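-- pv_equiv track=rewrite | github.com/carlosvitoriasonge-a11y/student-app-backend | utils/attendance_reader.py | extract_attendance_numbers
-- ===== SOURCE A (Python) =====
-- def extract_attendance_numbers(attendance_json: dict, student_id: str):
--     """
--     Lê o JSON cru salvo pelo attendance_sub.py e retorna:
--     - total de aulas
--     - presenças (出席, 遅刻, 怠学・居眠り, 忘れ物)
--     - eventos negativos (遅刻, 怠学・居眠り, 忘れ物)
--
--     未記録 é ignorado completamente.
--     欠席 conta como ausência, mas NÃO é negativo.
--     """
--
--     total = 0
--     present = 0
--     negative = 0
--
--     # ✔ Status confirmados por você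
--     PRESENT_STATUSES = {"出席", "遅刻", "怠学・居眠り", "忘れ物"}
--     NEGATIVE_STATUSES = {"遅刻", "怠学・居眠り", "忘れ物"}
--
--     for date, periods in attendance_json.items():
--         for period, info in periods.items():
--
--             total += 1  # cada período = 1 aula
--
--             status = info["students"].get(student_id)
--
--             # 未記録 → ignorar completamente
--             if not status or status == "未記録":
--                 continue
--
--             # presença
--             if status in PRESENT_STATUSES:
--                 present += 1
--
--             # comportamento negativo
--             if status in NEGATIVE_STATUSES:
--                 negative += 1
--
--             # 欠席 → não conta como presença, não é negativo
--             # (não precisa fazer nada)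
--
--     return {
--         "total": total,
--         "present": present,
--         "negative": negative
--     }
-- ===== SOURCE B (Python) =====
-- def extract_attendance_numbers(attendance_json: dict, student_id: str):
--     """Flatten all per-period statuses once, then count each relevant status."""
--     PRESENT_STATUSES = ("出席", "遅刻", "怠学・居眠り", "忘れ物")
--     NEGATIVE_STATUSES = ("遅刻", "怠学・居眠り", "忘れ物")
--
--     statuses = [info["students"].get(student_id)
--                 for periods in attendance_json.values()
--                 for info in periods.values()]
--
--     return {
--         "total": len(statuses),
--         "present": sum(statuses.count(s) for s in PRESENT_STATUSES),
--         "negative": sum(statuses.count(s) for s in NEGATIVE_STATUSES),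
--     }
-- ===== Notes on version B (the rewrite author's own statement) =====
-- stated objective: simpler
-- what changed: Replaces the nested loop with three running counters by a one-pass flatten of all per-period statuses followed by per-status list.count sums for present/negative and len for total.
import Mathlib
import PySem

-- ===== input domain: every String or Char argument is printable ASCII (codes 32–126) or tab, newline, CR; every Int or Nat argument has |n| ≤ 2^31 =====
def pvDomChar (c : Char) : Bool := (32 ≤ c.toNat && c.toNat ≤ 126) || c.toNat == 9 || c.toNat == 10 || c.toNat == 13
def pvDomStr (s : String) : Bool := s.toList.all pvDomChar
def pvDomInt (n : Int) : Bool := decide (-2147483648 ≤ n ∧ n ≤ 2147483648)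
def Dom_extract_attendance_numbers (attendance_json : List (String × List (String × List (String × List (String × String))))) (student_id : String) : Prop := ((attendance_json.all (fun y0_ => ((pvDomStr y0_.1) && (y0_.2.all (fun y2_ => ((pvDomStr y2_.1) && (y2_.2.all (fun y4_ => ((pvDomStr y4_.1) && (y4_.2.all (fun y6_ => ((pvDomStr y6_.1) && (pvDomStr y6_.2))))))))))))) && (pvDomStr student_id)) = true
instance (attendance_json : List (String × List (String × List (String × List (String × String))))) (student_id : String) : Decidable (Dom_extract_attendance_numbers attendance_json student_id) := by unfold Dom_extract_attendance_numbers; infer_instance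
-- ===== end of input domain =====

-- B flattens all per-period statuses into one list, then takes len for total and per-status
-- counts for present/negative; A keeps three running counters in a nested loop. Equal on Pre_.

-- ===== PORT A =====
-- info["students"].get(student_id); the getD default [] is only reached outside Pre_ (where Python raises KeyError)
def pvStat (student_id : String) (info : List (String × List (String × String))) : Option String :=
  PySem.Dict.get? (PySem.Dict.mk ((PySem.Dict.mk info).getD "students" [])) student_id

-- the body of A's inner loop (one period): total += 1; skip falsy/未記録; membership tests
def pvStepA (student_id : String) (acc : Int × Int × Int) (pi : String × List (String × List (String × String))) : Int × Int × Int :=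
  let total := acc.1 + 1
  let present := acc.2.1
  let negative := acc.2.2
  match pvStat student_id pi.2 with
  | none => (total, present, negative)            -- 'not status' (None) → continue
  | some status =>
    if status == "" || status == "未記録" then (total, present, negative)
    else
      let present := if PySem.Set.contains (PySem.Set.ofList ["出席", "遅刻", "怠学・居眠り", "忘れ物"]) status then present + 1 else present
      let negative := if PySem.Set.contains (PySem.Set.ofList ["遅刻", "怠学・居眠り", "忘れ物"]) status then negative + 1 else negative
      (total, present, negative)

def extract_attendance_numbers (attendance_json : List (String × List (String × List (String × List (String × String))))) (student_id : String) : List (String × Int) :=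
  let r := attendance_json.foldl (fun acc dp => dp.2.foldl (pvStepA student_id) acc) (0, 0, 0)
  [("total", r.1), ("present", r.2.1), ("negative", r.2.2)]

-- ===== PORT B =====
def extract_attendance_numbers_alt (attendance_json : List (String × List (String × List (String × List (String × String))))) (student_id : String) : List (String × Int) :=
  let statuses : List (Option String) :=
    attendance_json.flatMap (fun dp => dp.2.map (fun pi => pvStat student_id pi.2))
  [("total", (statuses.length : Int)),
   ("present", ["出席", "遅刻", "怠学・居眠り", "忘れ物"].foldl
      (fun a s => a + (PySem.List.count statuses (some s) : Int)) 0),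
   ("negative", ["遅刻", "怠学・居眠り", "忘れ物"].foldl
      (fun a s => a + (PySem.List.count statuses (some s) : Int)) 0)]

-- ===== PRECONDITION & SPEC =====
-- Pre_ requires every period's info dict to carry the key "students": A (and B alike) raise KeyError otherwise.
def Pre_extract_attendance_numbers (attendance_json : List (String × List (String × List (String × List (String × String))))) (student_id : String) : Prop :=
  (attendance_json.all (fun dp => dp.2.all (fun pi => pi.2.any (fun kv => kv.1 == "students")))) = true
instance (attendance_json : List (String × List (String × List (String × List (String × String))))) (student_id : String) : Decidable (Pre_extract_attendance_numbers attendance_json student_id) := by unfold Pre_extract_attendance_numbers; infer_instance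

def pvWitness_extract_attendance_numbers : (List (String × List (String × List (String × List (String × String))))) × String :=
  ([("2024-01-01", [("1", [("students", [("s1", "x")])])])], "s1")

def Spec_extract_attendance_numbers (attendance_json : List (String × List (String × List (String × List (String × String))))) (student_id : String) (out : List (String × Int)) : Prop := out = extract_attendance_numbers_alt attendance_json student_id
instance (attendance_json : List (String × List (String × List (String × List (String × String))))) (student_id : String) (out : List (String × Int)) : Decidable (Spec_extract_attendance_numbers attendance_json student_id out) := by unfold Spec_extract_attendance_numbers; infer_instance

-- ===== CLAIM (what is proved, stated in full; the proofs are below) =====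
def Claim_equal_extract_attendance_numbers : Prop := ∀ (attendance_json : List (String × List (String × List (String × List (String × String))))) (student_id : String), Dom_extract_attendance_numbers attendance_json student_id → Pre_extract_attendance_numbers attendance_json student_id → Spec_extract_attendance_numbers attendance_json student_id (extract_attendance_numbers attendance_json student_id)

-- ===== LEMMAS AND PROOFS =====

def pvPOpt : List (Option String) := [some "出席", some "遅刻", some "怠学・居眠り", some "忘れ物"]
def pvNOpt : List (Option String) := [some "遅刻", some "怠学・居眠り", some "忘れ物"]

-- per-element value of A's loop body, as pure arithmetic
theorem pvStepA_eq (sid : String) (acc : Int × Int × Int) (pi : String × List (String × List (String × String))) :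
    pvStepA sid acc pi
      = (acc.1 + 1,
         acc.2.1 + (if pvStat sid pi.2 ∈ pvPOpt then 1 else 0),
         acc.2.2 + (if pvStat sid pi.2 ∈ pvNOpt then 1 else 0)) := by
  unfold pvStepA
  cases hx : pvStat sid pi.2 with
  | none => simp [pvPOpt, pvNOpt]
  | some s =>
    by_cases h1 : s = ""
    · subst h1; simp [pvPOpt, pvNOpt]
    by_cases h2 : s = "未記録"
    · subst h2; simp [pvPOpt, pvNOpt]
    simp only [pvPOpt, pvNOpt, List.mem_cons, List.not_mem_nil, or_false,
      Option.some.injEq]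
    have hb : (s == "" || s == "未記録") = false := by
      simp [h1, h2]
    rw [hb]
    simp only [Bool.false_eq_true, if_false]
    by_cases p1 : s = "出席" <;> by_cases p2 : s = "遅刻" <;>
      by_cases p3 : s = "怠学・居眠り" <;> by_cases p4 : s = "忘れ物" <;>
      simp_all [PySem.Set.contains, PySem.Set.ofList, PySem.Set.add]

theorem pvCntP_cons (x : Option String) (l : List (Option String)) (L : List (Option String)) :
    ((List.countP (fun y => decide (y ∈ L)) (x :: l) : Int))
      = (if x ∈ L then 1 else 0) + (List.countP (fun y => decide (y ∈ L)) l : Int) := by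
  rw [List.countP_cons]
  by_cases h : x ∈ L <;> simp [h] <;> push_cast <;> ring

-- A's inner loop over one day's periods
theorem pvFoldInner (sid : String) (ps : List (String × List (String × List (String × String)))) (t p n : Int) :
    ps.foldl (pvStepA sid) (t, p, n)
      = (t + (ps.length : Int),
         p + (List.countP (fun y => decide (y ∈ pvPOpt)) (ps.map (fun pi => pvStat sid pi.2)) : Int),
         n + (List.countP (fun y => decide (y ∈ pvNOpt)) (ps.map (fun pi => pvStat sid pi.2)) : Int)) := by
  induction ps generalizing t p n with
  | nil => simp
  | cons hd tl ih =>
    rw [List.foldl_cons, pvStepA_eq, ih]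
    simp only [List.map_cons, pvCntP_cons, List.length_cons]
    refine Prod.ext (by push_cast; ring) (Prod.ext ?_ ?_) <;> dsimp only <;> ring

-- A's whole double loop versus the flattened status list
theorem pvFoldA (sid : String) (aj : List (String × List (String × List (String × List (String × String))))) (t p n : Int) :
    aj.foldl (fun acc dp => dp.2.foldl (pvStepA sid) acc) (t, p, n)
      = (t + ((aj.flatMap (fun dp => dp.2.map (fun pi => pvStat sid pi.2))).length : Int),
         p + (List.countP (fun y => decide (y ∈ pvPOpt)) (aj.flatMap (fun dp => dp.2.map (fun pi => pvStat sid pi.2))) : Int),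
         n + (List.countP (fun y => decide (y ∈ pvNOpt)) (aj.flatMap (fun dp => dp.2.map (fun pi => pvStat sid pi.2))) : Int)) := by
  induction aj generalizing t p n with
  | nil => simp
  | cons hd tl ih =>
    rw [List.foldl_cons, pvFoldInner, ih]
    simp only [List.flatMap_cons, List.countP_append, List.length_append, List.length_map]
    refine Prod.ext (by push_cast; ring) (Prod.ext ?_ ?_) <;> dsimp only <;> push_cast <;> ring

-- B's sum of per-status counts is a single countP over the flattened list
theorem pvSumCountsP (l : List (Option String)) :
    (l.count (some "出席") : Int) + (l.count (some "遅刻") : Int)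
      + (l.count (some "怠学・居眠り") : Int) + (l.count (some "忘れ物") : Int)
      = (List.countP (fun y => decide (y ∈ pvPOpt)) l : Int) := by
  induction l with
  | nil => simp
  | cons x l ih =>
    simp only [List.count_cons, List.countP_cons, pvPOpt, List.mem_cons, List.not_mem_nil, or_false]
    by_cases p1 : x = some "出席" <;> by_cases p2 : x = some "遅刻" <;>
      by_cases p3 : x = some "怠学・居眠り" <;> by_cases p4 : x = some "忘れ物" <;>
      simp_all [pvPOpt] <;> push_cast <;> omega

theorem pvSumCountsN (l : List (Option String)) :
    (l.count (some "遅刻") : Int) + (l.count (some "怠学・居眠り") : Int)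
      + (l.count (some "忘れ物") : Int)
      = (List.countP (fun y => decide (y ∈ pvNOpt)) l : Int) := by
  induction l with
  | nil => simp
  | cons x l ih =>
    simp only [List.count_cons, List.countP_cons, pvNOpt, List.mem_cons, List.not_mem_nil, or_false]
    by_cases p2 : x = some "遅刻" <;> by_cases p3 : x = some "怠学・居眠り" <;>
      by_cases p4 : x = some "忘れ物" <;>
      simp_all [pvNOpt] <;> push_cast <;> omega

-- ===== VERDICT (by name: the statement is the Claim_ definition above) =====
theorem extract_attendance_numbers_spec : Claim_equal_extract_attendance_numbers := by
  intro aj sid _ _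
  unfold Spec_extract_attendance_numbers extract_attendance_numbers extract_attendance_numbers_alt
  rw [pvFoldA]
  simp only [List.foldl_cons, List.foldl_nil, PySem.List.count_eq]
  rw [← pvSumCountsP, ← pvSumCountsN]
  simp only [zero_add]
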